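-- pv_equiv track=rewrite | github.com/yoshitaka-k/mahjong | libs/mahjong.py | chicha
-- ===== SOURCE A (Python) =====
-- def chicha(dice):
--     l = 0
--     for i in range(1, dice+1):
--         l = i
--         if i > 8:
--             l = i - 8
--         elif i > 4:
--             l = i - 4
--     return l
-- ===== SOURCE B (Python) =====
-- def chicha(dice):
--     if dice < 1:
--         return 0
--     if dice > 8:
--         return dice - 8
--     if dice > 4:
--         return dice - 4
--     return dice
-- ===== Notes on version B (the rewrite author's own statement) =====
-- stated objective: faster
-- what changed: Replaced the O(n) loop over range(1, dice+1), whose result depends only on the final iteration, by a direct O(1) threshold formula on dice.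
import Mathlib
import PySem

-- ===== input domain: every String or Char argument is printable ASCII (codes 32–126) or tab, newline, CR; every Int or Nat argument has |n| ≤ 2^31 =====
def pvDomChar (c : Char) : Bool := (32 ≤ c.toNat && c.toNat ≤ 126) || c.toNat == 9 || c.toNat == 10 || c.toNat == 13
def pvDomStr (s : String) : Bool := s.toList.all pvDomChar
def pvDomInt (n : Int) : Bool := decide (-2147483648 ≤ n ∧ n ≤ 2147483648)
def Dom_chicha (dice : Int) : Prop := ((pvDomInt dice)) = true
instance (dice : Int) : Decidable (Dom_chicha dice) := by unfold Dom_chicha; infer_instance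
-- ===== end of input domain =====

-- ===== PORT A =====
-- B replaces A's O(n) loop (result depends only on the last iteration) by an O(1) threshold formula.
def chicha (dice : Int) : Int :=
  (PySem.List.pyRange 1 (dice + 1) 1).foldl
    (fun _l i => if i > 8 then i - 8 else if i > 4 then i - 4 else i) 0

-- ===== PORT B =====
def chicha_alt (dice : Int) : Int :=
  if dice < 1 then 0
  else if dice > 8 then dice - 8
  else if dice > 4 then dice - 4
  else dice

-- ===== PRECONDITION & SPEC =====
def Spec_chicha (dice : Int) (out : Int) : Prop := out = chicha_alt dice
instance (dice : Int) (out : Int) : Decidable (Spec_chicha dice out) := by unfold Spec_chicha; infer_instance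

-- ===== CLAIM (what is proved, stated in full; the proofs are below) =====
def Claim_equal_chicha : Prop := ∀ (dice : Int), Dom_chicha dice → Spec_chicha dice (chicha dice)

-- ===== LEMMAS AND PROOFS =====

-- ===== VERDICT (by name: the statement is the Claim_ definition above) =====
theorem chicha_spec : Claim_equal_chicha := by
  intro dice _
  unfold Spec_chicha chicha chicha_alt
  by_cases h : dice < 1
  · rw [PySem.List.pyRange_one_eq_nil (by omega)]
    simp [h]
  · rw [PySem.List.pyRange_one_succ_right (by omega : (1:Int) ≤ dice)]
    rw [List.foldl_append]
    simp [h]
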